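-- pv_equiv track=rewrite | github.com/yanggelinux/algorithm-data-structure | algorithm/binary_search/binary_search.py | binary_search_cycle
-- ===== SOURCE A (Python) =====
-- def bs(arr,target):
--     """
--     二分查找
--     :param arr:
--     :param target:
--     :return:
--     """
--     low,high = 0,len(arr)-1
--     while low <= high:
--         mid = low + (high - low) // 2
--         if arr[mid] == target:
--             return mid
--         elif arr[mid] < target:
--             low = mid + 1
--         else:
--             high = mid -1
--     return None
--
-- def binary_search_cycle(target):
--     """
--     一个循环数组[4,5,6,1,2,3],实现一个求给定值的二分查找
--     :param target:
--     :return: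
--     """
--     arr = [4,5,6,1,2,3]
--     i, j = 0, 1
--     pivot_index = 0
--     length = len(arr)
--     while i < length and j < length:
--         if arr[i] > arr[j]:
--             pivot_index = i
--             break
--         i += 1
--         j += 1
--     left_arr = arr[:pivot_index + 1]
--     right_arr = arr[pivot_index + 1:]
--     left_mid = bs(left_arr, target)
--     right_mid = bs(right_arr, target)
--     if left_mid is not None and right_mid is None:
--         return left_mid
--     elif right_mid is not None and left_mid is None:
--         return right_mid + len(left_arr)
--     else:
--         return -1
-- ===== SOURCE B (Python) =====
-- def binary_search_cycle(target):
--     """Single-pass modified binary search over the rotated array, one low/high window (no pivot search, no slicing)."""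
--     arr = [4, 5, 6, 1, 2, 3]
--     low, high = 0, len(arr) - 1
--     while low <= high:
--         mid = (low + high) // 2
--         if arr[mid] == target:
--             return mid
--         if arr[low] <= arr[mid]:
--             if arr[low] <= target < arr[mid]:
--                 high = mid - 1
--             else:
--                 low = mid + 1
--         else:
--             if arr[mid] < target <= arr[high]:
--                 low = mid + 1
--             else:
--                 high = mid - 1
--     return -1
-- ===== Notes on version B (the rewrite author's own statement) =====
-- stated objective: alternative
-- what changed: Replaces A's pivot-scan plus array slicing plus two separate plain binary searches (combined via Option results) by a single modified binary search over one low/high window of the rotated array, deciding at each step which half is sorted.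
import Mathlib
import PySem

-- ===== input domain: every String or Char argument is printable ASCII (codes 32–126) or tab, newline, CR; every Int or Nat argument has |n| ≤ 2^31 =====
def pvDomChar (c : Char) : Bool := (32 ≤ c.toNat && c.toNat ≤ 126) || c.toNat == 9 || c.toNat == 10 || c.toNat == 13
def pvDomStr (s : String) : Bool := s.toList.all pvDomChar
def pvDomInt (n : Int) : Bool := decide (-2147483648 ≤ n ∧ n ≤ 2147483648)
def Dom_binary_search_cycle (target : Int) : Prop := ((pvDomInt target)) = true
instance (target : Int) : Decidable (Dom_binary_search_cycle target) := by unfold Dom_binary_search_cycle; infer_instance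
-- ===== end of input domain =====

-- B replaces A's pivot-scan plus slicing plus two plain binary searches by a single rotated-array binary search loop (alternative decomposition).

-- ===== PORT A =====
-- the 'while low <= high' loop of A's helper bs(); fuel is a totality guard only (the window
-- shrinks every iteration, so fuel = 8 > len(arr)+1 is never exhausted on the fixed 6-element array);
-- arr[mid] is always in range here, so pyGet?.getD 0 never takes the default.
def pvBsLoop (fuel : Nat) (arr : List Int) (target low high : Int) : Option Int :=
  match fuel with
  | 0 => none
  | fuel + 1 =>
    if low ≤ high then
      let mid := low + PySem.Int.floordiv (high - low) 2
      let v := (PySem.List.pyGet? arr mid).getD 0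
      if v = target then some mid
      else if v < target then pvBsLoop fuel arr target (mid + 1) high
      else pvBsLoop fuel arr target low (mid - 1)
    else none

-- the pivot-finding while loop of A (i,j advance together, break at first descent); indices stay
-- in range while the guard holds; fuel 8 > len(arr) is a totality guard only.
def pvPivotLoop (fuel : Nat) (arr : List Int) (len i j pivot : Int) : Int :=
  match fuel with
  | 0 => pivot
  | fuel + 1 =>
    if i < len ∧ j < len then
      if (PySem.List.pyGet? arr i).getD 0 > (PySem.List.pyGet? arr j).getD 0 then i
      else pvPivotLoop fuel arr len (i + 1) (j + 1) pivot
    else pivot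

def binary_search_cycle (target : Int) : Int :=
  let arr : List Int := [4, 5, 6, 1, 2, 3]
  let pivot_index := pvPivotLoop 8 arr ((arr.length : Int)) 0 1 0
  let left_arr := PySem.List.slice arr none (some (pivot_index + 1))
  let right_arr := PySem.List.slice arr (some (pivot_index + 1)) none
  let left_mid := pvBsLoop 8 left_arr target 0 ((left_arr.length : Int) - 1)
  let right_mid := pvBsLoop 8 right_arr target 0 ((right_arr.length : Int) - 1)
  match left_mid, right_mid with
  | some l, none => l
  | none, some r => r + (left_arr.length : Int)
  | _, _ => -1

-- ===== PORT B =====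
-- the single 'while low <= high' loop of Source B; fuel 8 is a totality guard only (the window shrinks
-- every iteration); arr[mid]/arr[low]/arr[high] are always in range, the getD default is never taken.
def pvRotLoop (fuel : Nat) (arr : List Int) (target low high : Int) : Int :=
  match fuel with
  | 0 => -1
  | fuel + 1 =>
    if low ≤ high then
      let mid := PySem.Int.floordiv (low + high) 2
      let am := (PySem.List.pyGet? arr mid).getD 0
      if am = target then mid
      else if (PySem.List.pyGet? arr low).getD 0 ≤ am then
        (if (PySem.List.pyGet? arr low).getD 0 ≤ target ∧ target < am then
          pvRotLoop fuel arr target low (mid - 1)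
        else pvRotLoop fuel arr target (mid + 1) high)
      else
        (if am < target ∧ target ≤ (PySem.List.pyGet? arr high).getD 0 then
          pvRotLoop fuel arr target (mid + 1) high
        else pvRotLoop fuel arr target low (mid - 1))
    else -1

def binary_search_cycle_alt (target : Int) : Int :=
  pvRotLoop 8 [4, 5, 6, 1, 2, 3] target 0 5

-- ===== PRECONDITION & SPEC =====
def Spec_binary_search_cycle (target : Int) (out : Int) : Prop := out = binary_search_cycle_alt target
instance (target : Int) (out : Int) : Decidable (Spec_binary_search_cycle target out) := by unfold Spec_binary_search_cycle; infer_instance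

-- ===== CLAIM (what is proved, stated in full; the proofs are below) =====
def Claim_equal_binary_search_cycle : Prop := ∀ (target : Int), Dom_binary_search_cycle target → Spec_binary_search_cycle target (binary_search_cycle target)

-- ===== LEMMAS AND PROOFS =====
lemma A_out_of_range (t : Int) (h : t < 1 ∨ 6 < t) : binary_search_cycle t = -1 := by
  simp [binary_search_cycle, pvBsLoop, pvPivotLoop, PySem.Int.floordiv,
    PySem.List.pyGet?, PySem.List.pyIdx?, PySem.List.slice]
  split_ifs <;> first | rfl | omega

lemma B_out_of_range (t : Int) (h : t < 1 ∨ 6 < t) : binary_search_cycle_alt t = -1 := by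
  simp [binary_search_cycle_alt, pvRotLoop, PySem.Int.floordiv,
    PySem.List.pyGet?, PySem.List.pyIdx?]
  split_ifs <;> omega

-- ===== VERDICT (by name: the statement is the Claim_ definition above) =====
theorem binary_search_cycle_spec : Claim_equal_binary_search_cycle := by
  intro t _
  unfold Spec_binary_search_cycle
  by_cases h1 : 1 ≤ t
  · by_cases h6 : t ≤ 6
    · interval_cases t <;> decide
    · rw [A_out_of_range t (by omega), B_out_of_range t (by omega)]
  · rw [A_out_of_range t (by omega), B_out_of_range t (by omega)]
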